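-- pv_equiv track=rewrite | github.com/rubengrootroessink/AdventOfCode | 2024/07/2.py | rec
-- ===== SOURCE A (Python) =====
-- import math
--
-- def rec(final_val, curr_val, vals):
--     if curr_val > final_val:
--         return False
--     elif final_val == curr_val and vals == []:
--         return True
--     elif vals == []:
--         return False
--     else:
--         new_vals = []
--         new_vals.append(curr_val + vals[0])
--         new_vals.append(curr_val * vals[0])
--         new_vals.append(curr_val * 10**int(math.log10(vals[0]) + 1) + vals[0])
--         return any([rec(final_val, new_val, vals[1:]) for new_val in new_vals])
-- ===== SOURCE B (Python) =====
-- def rec(final_val, curr_val, vals):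
--     # Iterative forward sweep over a deduplicated set of reachable partial values.
--     states = {curr_val}
--     for v in vals:
--         nxt = set()
--         for s in states:
--             if s <= final_val:
--                 nxt.add(s + v)
--                 nxt.add(s * v)
--                 nxt.add(s * 10 ** len(str(v)) + v)
--         states = nxt
--     return final_val in states
-- ===== Notes on version B (the rewrite author's own statement) =====
-- stated objective: alternative
-- what changed: Replaced the pruned recursion tree over suffixes by an iterative breadth-first sweep that maintains a deduplicated set of reachable partial values and checks membership of the target at the end; concatenation uses len(str(v)) instead of math.log10.
-- outside the precondition, e.g. on rec(10, 5, [20, -3]): A returns False, B returns False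
import Mathlib
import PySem

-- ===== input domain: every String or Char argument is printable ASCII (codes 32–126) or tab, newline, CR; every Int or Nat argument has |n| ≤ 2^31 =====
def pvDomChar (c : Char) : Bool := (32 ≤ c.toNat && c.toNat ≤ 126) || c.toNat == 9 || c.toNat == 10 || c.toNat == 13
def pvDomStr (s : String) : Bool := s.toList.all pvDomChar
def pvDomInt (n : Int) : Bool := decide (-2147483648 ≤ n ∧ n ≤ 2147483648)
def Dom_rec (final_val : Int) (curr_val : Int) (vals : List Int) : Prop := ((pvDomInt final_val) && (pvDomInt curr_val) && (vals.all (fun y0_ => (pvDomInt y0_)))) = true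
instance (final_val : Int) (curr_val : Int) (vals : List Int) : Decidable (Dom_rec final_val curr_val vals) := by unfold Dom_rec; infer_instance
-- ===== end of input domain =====

-- B replaces A's pruned recursion tree by an iterative sweep maintaining a set of reachable
-- partial values (alternative decomposition; exact same result on Pre_).


-- ===== PORT A =====
-- Hand port of Python's `10**int(math.log10(v) + 1)`: exact for 1 ≤ v ≤ 2^31 (guaranteed
-- by Dom_rec/Pre_rec on every input where Python A reaches this expression), where
-- int(math.log10(v)+1) = len(str(v)), the number of decimal digits of v.
def pow10Digits (v : Int) : Int := (10 : Int) ^ (PySem.Int.toStr v).length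

def rec (final_val : Int) (curr_val : Int) (vals : List Int) : Bool :=
  if curr_val > final_val then false
  else if final_val = curr_val ∧ vals = [] then true
  else
    match vals with
    | [] => false
    | v :: rest =>
      let new_vals := [curr_val + v, curr_val * v, curr_val * pow10Digits v + v]
      (new_vals.map (fun new_val => rec final_val new_val rest)).any id
termination_by vals.length
decreasing_by simp_all

-- ===== PORT B =====
-- Source B's `10 ** len(str(v))` is the same expression pow10Digits.
def rec_alt (final_val : Int) (curr_val : Int) (vals : List Int) : Bool :=
  let states := vals.foldl
    (fun (states : PySem.Set Int) v =>
      states.foldl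
        (fun (nxt : PySem.Set Int) s =>
          if s ≤ final_val then
            ((nxt.add (s + v)).add (s * v)).add (s * pow10Digits v + v)
          else nxt)
        PySem.Set.empty)
    (PySem.Set.ofList [curr_val])
  PySem.Set.contains states final_val

-- ===== PRECONDITION & SPEC =====
-- Pre_ excludes inputs whose value list contains a non-positive element unless the very first
-- comparison already returns: on such inputs Python A raises ValueError (math.log10 on a
-- non-positive number) whenever the recursion reaches that element, and on the remaining ones
-- A only happens to return False because every branch was pruned before reaching it.
def Pre_rec (final_val : Int) (curr_val : Int) (vals : List Int) : Prop :=
  curr_val > final_val ∨ ∀ v ∈ vals, 1 ≤ v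
instance (final_val : Int) (curr_val : Int) (vals : List Int) : Decidable (Pre_rec final_val curr_val vals) := by unfold Pre_rec; infer_instance

def pvWitness_rec : Int × Int × List Int := (29, 1, [2, 3, 4])

def Spec_rec (final_val : Int) (curr_val : Int) (vals : List Int) (out : Bool) : Prop := out = rec_alt final_val curr_val vals
instance (final_val : Int) (curr_val : Int) (vals : List Int) (out : Bool) : Decidable (Spec_rec final_val curr_val vals out) := by unfold Spec_rec; infer_instance

-- ===== CLAIM (what is proved, stated in full; the proofs are below) =====
def Claim_equal_rec : Prop := ∀ (final_val : Int) (curr_val : Int) (vals : List Int), Dom_rec final_val curr_val vals → Pre_rec final_val curr_val vals → Spec_rec final_val curr_val vals (rec final_val curr_val vals)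

-- ===== LEMMAS AND PROOFS =====

-- One sweep step of B: expand every surviving state by the three operations.
def sweepStep (final_val v : Int) (states : PySem.Set Int) : PySem.Set Int :=
  states.foldl
    (fun (nxt : PySem.Set Int) s =>
      if s ≤ final_val then
        ((nxt.add (s + v)).add (s * v)).add (s * pow10Digits v + v)
      else nxt)
    PySem.Set.empty

theorem rec_alt_eq_sweep (final_val curr_val : Int) (vals : List Int) :
    rec_alt final_val curr_val vals =
      PySem.Set.contains (vals.foldl (fun S v => sweepStep final_val v S) (PySem.Set.ofList [curr_val])) final_val := rfl

theorem mem_sweepStep_aux (final_val v x : Int) (l : List Int) (acc : PySem.Set Int) :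
    x ∈ l.foldl
      (fun (nxt : PySem.Set Int) s =>
        if s ≤ final_val then
          ((nxt.add (s + v)).add (s * v)).add (s * pow10Digits v + v)
        else nxt) acc ↔
    x ∈ acc ∨ ∃ s ∈ l, s ≤ final_val ∧
      (x = s + v ∨ x = s * v ∨ x = s * pow10Digits v + v) := by
  induction l generalizing acc with
  | nil => simp
  | cons s l ih =>
    simp only [List.foldl_cons, ih, List.mem_cons]
    constructor
    · rintro (hacc | ⟨t, ht, h2, h3⟩)
      · by_cases h : s ≤ final_val
        · rw [if_pos h] at hacc
          simp only [PySem.Set.mem_add] at hacc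
          rcases hacc with ((h1 | h1) | h1) | h1
          · exact Or.inl h1
          · exact Or.inr ⟨s, Or.inl rfl, h, Or.inl h1⟩
          · exact Or.inr ⟨s, Or.inl rfl, h, Or.inr (Or.inl h1)⟩
          · exact Or.inr ⟨s, Or.inl rfl, h, Or.inr (Or.inr h1)⟩
        · rw [if_neg h] at hacc
          exact Or.inl hacc
      · exact Or.inr ⟨t, Or.inr ht, h2, h3⟩
    · rintro (hacc | ⟨t, (rfl | ht), h2, h3⟩)
      · left
        split_ifs with h
        · simp only [PySem.Set.mem_add]
          exact Or.inl (Or.inl (Or.inl hacc))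
        · exact hacc
      · left
        rw [if_pos h2]
        simp only [PySem.Set.mem_add]
        rcases h3 with h3 | h3 | h3
        · exact Or.inl (Or.inl (Or.inr h3))
        · exact Or.inl (Or.inr h3)
        · exact Or.inr h3
      · exact Or.inr ⟨t, ht, h2, h3⟩

theorem mem_sweepStep (final_val v x : Int) (S : PySem.Set Int) :
    x ∈ sweepStep final_val v S ↔
      ∃ s ∈ S, s ≤ final_val ∧ (x = s + v ∨ x = s * v ∨ x = s * pow10Digits v + v) := by
  unfold sweepStep
  rw [mem_sweepStep_aux]
  simp [PySem.Set.empty]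

theorem rec_nil_iff (final_val curr_val : Int) :
    rec final_val curr_val [] = true ↔ final_val = curr_val := by
  unfold rec
  split_ifs with h1 h2
  · simp; omega
  · simp [h2.1]
  · simp; intro h; exact h2 ⟨h, rfl⟩

theorem rec_cons_iff (final_val curr_val v : Int) (rest : List Int) :
    rec final_val curr_val (v :: rest) = true ↔
      curr_val ≤ final_val ∧
        (rec final_val (curr_val + v) rest = true ∨
         rec final_val (curr_val * v) rest = true ∨
         rec final_val (curr_val * pow10Digits v + v) rest = true) := by
  rw [rec]
  split_ifs with h1 h2
  · simp; omega
  · exact absurd h2.2 (by simp)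
  · simp only [List.map_cons, List.map_nil, List.any_cons, List.any_nil, id,
      Bool.or_eq_true, Bool.false_eq_true, or_false]
    constructor
    · intro h; exact ⟨by omega, h⟩
    · intro h; exact h.2

theorem sweep_contains_iff (final_val : Int) (vals : List Int) (S : PySem.Set Int) :
    PySem.Set.contains (vals.foldl (fun S v => sweepStep final_val v S) S) final_val = true ↔
      ∃ s ∈ S, rec final_val s vals = true := by
  induction vals generalizing S with
  | nil =>
    rw [PySem.Set.contains_iff]
    simp only [List.foldl_nil, rec_nil_iff]
    constructor
    · intro h; exact ⟨final_val, h, rfl⟩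
    · rintro ⟨s, hs, rfl⟩; exact hs
  | cons v rest ih =>
    simp only [List.foldl_cons, ih]
    constructor
    · rintro ⟨s', hs', hrec⟩
      rw [mem_sweepStep] at hs'
      obtain ⟨s, hs, hle, (rfl | rfl | rfl)⟩ := hs' <;>
        exact ⟨s, hs, (rec_cons_iff _ _ _ _).2 ⟨hle, by tauto⟩⟩
    · rintro ⟨s, hs, hrec⟩
      rw [rec_cons_iff] at hrec
      obtain ⟨hle, h | h | h⟩ := hrec
      · exact ⟨s + v, (mem_sweepStep _ _ _ _).2 ⟨s, hs, hle, by tauto⟩, h⟩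
      · exact ⟨s * v, (mem_sweepStep _ _ _ _).2 ⟨s, hs, hle, by tauto⟩, h⟩
      · exact ⟨s * pow10Digits v + v, (mem_sweepStep _ _ _ _).2 ⟨s, hs, hle, by tauto⟩, h⟩

theorem rec_eq_rec_alt (final_val curr_val : Int) (vals : List Int) :
    rec final_val curr_val vals = rec_alt final_val curr_val vals := by
  rw [Bool.eq_iff_iff, rec_alt_eq_sweep, sweep_contains_iff]
  have hofl : PySem.Set.ofList [curr_val] = [curr_val] := rfl
  rw [hofl]
  constructor
  · intro h
    exact ⟨curr_val, List.mem_singleton.mpr rfl, h⟩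
  · rintro ⟨s, hs, h⟩
    have hsc : s = curr_val := List.mem_singleton.mp hs
    exact hsc ▸ h

-- ===== VERDICT (by name: the statement is the Claim_ definition above) =====
theorem rec_spec : Claim_equal_rec := by
  intro final_val curr_val vals _ _
  unfold Spec_rec
  exact rec_eq_rec_alt final_val curr_val vals
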